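-- pv_equiv track=rewrite | github.com/eduzrh/MTKGA-Wild | on_demand_agentic_hypergraph_collaboration/hypergraph_agent_execution.py | _update_modality_pairs
-- ===== SOURCE A (Python) =====
-- from typing import List, Dict, Set, Tuple
-- from typing import List, Dict, Set, Tuple
--
-- def _update_modality_pairs(
--                            original_pairs: List[Tuple[int, int]],
--                            execution_pairs: Dict[int, int]) -> List[Tuple[int, int]]:
--     """
--     Update modality layer alignment pairs: place alignments from execution_pairs at TOP-1 position
--
--     Args:
--         original_pairs: original alignment pair list
--         execution_pairs: alignment results judged by LLM
--
--     Returns: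
--         updated alignment pair list
--     """
--     # Group by KG1 entities
--     grouped = {}
--     for kg1, kg2 in original_pairs:
--         if kg1 not in grouped:
--             grouped[kg1] = []
--         grouped[kg1].append(kg2)
--
--     # Reorder and deduplicate. The overall logic here is an operation on the hypergraph,
--     # essentially moving towards eliminating conflicts. Specifically, it is achieved by
--     # replacing core entity pairs within the hypergraph to adjust hyperedges, update
--     # projections, or reweight connections to modify the hypergraph structure
--     updated_pairs = []
--     processed_entities = set()
--
--     for kg1_entity in sorted(set([kg1 for kg1, _ in original_pairs])):
--         if kg1_entity in processed_entities:
--             continue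
--
--         processed_entities.add(kg1_entity)
--         kg2_list = grouped.get(kg1_entity, [])
--
--         # If this entity is in execution_pairs, place it first
--         if kg1_entity in execution_pairs:
--             exec_kg2 = execution_pairs[kg1_entity]
--
--             # First add execution alignment (TOP-1)
--             updated_pairs.append((kg1_entity, exec_kg2))
--
--             # Then add other alignments (remove duplicate exec_kg2)
--             seen_kg2 = {exec_kg2}
--             for kg2 in kg2_list:
--                 if kg2 not in seen_kg2:
--                     updated_pairs.append((kg1_entity, kg2))
--                     seen_kg2.add(kg2)
--         else:
--             # No execution alignment, keep original order but deduplicate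
--             seen_kg2 = set()
--             for kg2 in kg2_list:
--                 if kg2 not in seen_kg2:
--                     updated_pairs.append((kg1_entity, kg2))
--                     seen_kg2.add(kg2)
--
--     return updated_pairs
-- ===== SOURCE B (Python) =====
-- from typing import List, Dict, Tuple
--
-- def _update_modality_pairs(
--                            original_pairs: List[Tuple[int, int]],
--                            execution_pairs: Dict[int, int]) -> List[Tuple[int, int]]:
--     # Selection-style: repeatedly take the smallest remaining kg1, emit its
--     # (execution-first, deduplicated) block, and drop that key from the list.
--     updated = []
--     pairs = original_pairs
--     while pairs:
--         k = min(p[0] for p in pairs)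
--         vals = [v for a, v in pairs if a == k]
--         if k in execution_pairs:
--             vals = [execution_pairs[k]] + vals
--         updated.extend((k, v) for v in dict.fromkeys(vals))
--         pairs = [p for p in pairs if p[0] != k]
--     return updated
-- ===== Notes on version B (the rewrite author's own statement) =====
-- stated objective: simpler
-- what changed: Replaces A's pre-built grouping dict plus sorted distinct-key loop with an inner dedup-set by a selection-style loop that repeatedly extracts the minimum remaining kg1, emits its execution-first block deduplicated via dict.fromkeys, and filters that key out of the pair list.
import Mathlib
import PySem

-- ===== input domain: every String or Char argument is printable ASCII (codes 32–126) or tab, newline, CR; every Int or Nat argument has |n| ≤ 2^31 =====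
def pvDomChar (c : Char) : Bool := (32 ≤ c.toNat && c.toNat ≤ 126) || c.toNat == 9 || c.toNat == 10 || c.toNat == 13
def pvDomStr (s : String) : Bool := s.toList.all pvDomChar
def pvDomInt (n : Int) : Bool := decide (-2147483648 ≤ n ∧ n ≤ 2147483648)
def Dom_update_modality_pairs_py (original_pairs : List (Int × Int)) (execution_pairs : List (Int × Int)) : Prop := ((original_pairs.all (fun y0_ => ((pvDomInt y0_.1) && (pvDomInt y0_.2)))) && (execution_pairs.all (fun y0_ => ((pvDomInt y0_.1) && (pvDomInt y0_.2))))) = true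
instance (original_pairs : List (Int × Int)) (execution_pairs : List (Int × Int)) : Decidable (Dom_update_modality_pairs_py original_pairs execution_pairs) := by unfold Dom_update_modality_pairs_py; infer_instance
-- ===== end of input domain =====

-- B replaces A's grouping dict + sorted-distinct-keys loop by a selection loop
-- (repeatedly take the minimum remaining kg1, emit its block, filter it out): simpler, not faster.

-- ===== PORT A =====
def update_modality_pairs_py (original_pairs : List (Int × Int)) (execution_pairs : List (Int × Int)) : List (Int × Int) :=
  let ep : PySem.Dict Int Int := PySem.Dict.mk execution_pairs
  -- grouped[kg1] = [] if absent, then grouped[kg1].append(kg2)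
  let grouped : PySem.Dict Int (List Int) :=
    original_pairs.foldl (fun d p => d.modify p.1 [] (fun l => l ++ [p.2])) PySem.Dict.empty
  -- for kg1_entity in sorted(set([kg1 for kg1, _ in original_pairs])):
  let keys := PySem.List.sorted (PySem.Set.ofList (original_pairs.map (fun p => p.1))) (fun x => x)
  let final := keys.foldl (fun (st : List (Int × Int) × PySem.Set Int) kg1 =>
    if PySem.Set.contains st.2 kg1 then st
    else
      let processed := PySem.Set.add st.2 kg1
      let kg2_list := grouped.getD kg1 []
      match ep.get? kg1 with
      | some exec_kg2 =>
        let inner := kg2_list.foldl (fun (q : List (Int × Int) × PySem.Set Int) kg2 =>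
            if PySem.Set.contains q.2 kg2 then q
            else (q.1 ++ [(kg1, kg2)], PySem.Set.add q.2 kg2))
          (st.1 ++ [(kg1, exec_kg2)], PySem.Set.ofList [exec_kg2])
        (inner.1, processed)
      | none =>
        let inner := kg2_list.foldl (fun (q : List (Int × Int) × PySem.Set Int) kg2 =>
            if PySem.Set.contains q.2 kg2 then q
            else (q.1 ++ [(kg1, kg2)], PySem.Set.add q.2 kg2))
          (st.1, PySem.Set.empty)
        (inner.1, processed)) ([], PySem.Set.empty)
  final.1

-- ===== PORT B =====
-- the 'while pairs:' loop of Source B, as a recursion over the shrinking pair list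
def updateModalityAltGo (ep : PySem.Dict Int Int) (pairs : List (Int × Int)) : List (Int × Int) :=
  match h : PySem.List.min? (pairs.map (fun p => p.1)) (fun x => x) with
  | none => []
  | some k =>
    let vals := (pairs.filter (fun p => p.1 == k)).map (fun p => p.2)
    let vals := match ep.get? k with
      | some e => e :: vals
      | none => vals
    (PySem.List.dedup vals).map (fun v => (k, v)) ++
      updateModalityAltGo ep (pairs.filter (fun p => !(p.1 == k)))
termination_by pairs.length
decreasing_by
  have hk : k ∈ pairs.map (fun p => p.1) := PySem.List.min?_mem h
  rcases List.mem_map.mp hk with ⟨p, hp, hpk⟩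
  simp only [List.length_unattach]
  have hlen : pairs.attach.length = pairs.length := by simp
  refine Nat.lt_of_le_of_ne (le_trans (List.length_filter_le _ _) (le_of_eq hlen)) (fun he => ?_)
  rw [← hlen] at he
  have heq := (List.filter_sublist).eq_of_length he
  have hm : (⟨p, hp⟩ : {x // x ∈ pairs}) ∈ pairs.attach := List.mem_attach pairs ⟨p, hp⟩
  rw [← heq] at hm
  have := (List.mem_filter.mp hm).2
  simp [hpk] at this

def update_modality_pairs_py_alt (original_pairs : List (Int × Int)) (execution_pairs : List (Int × Int)) : List (Int × Int) :=
  updateModalityAltGo (PySem.Dict.mk execution_pairs) original_pairs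

-- ===== PRECONDITION & SPEC =====
def Spec_update_modality_pairs_py (original_pairs : List (Int × Int)) (execution_pairs : List (Int × Int)) (out : List (Int × Int)) : Prop := out = update_modality_pairs_py_alt original_pairs execution_pairs
instance (original_pairs : List (Int × Int)) (execution_pairs : List (Int × Int)) (out : List (Int × Int)) : Decidable (Spec_update_modality_pairs_py original_pairs execution_pairs out) := by unfold Spec_update_modality_pairs_py; infer_instance

-- ===== CLAIM (what is proved, stated in full; the proofs are below) =====
def Claim_equal_update_modality_pairs_py : Prop := ∀ (original_pairs : List (Int × Int)) (execution_pairs : List (Int × Int)), Dom_update_modality_pairs_py original_pairs execution_pairs → Spec_update_modality_pairs_py original_pairs execution_pairs (update_modality_pairs_py original_pairs execution_pairs)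

-- ===== LEMMAS AND PROOFS =====

-- ordered dedup continued past an initial seen-set (the inner loop's effect)
def pvDedupFrom (seen : PySem.Set Int) : List Int → List Int
  | [] => []
  | x :: xs => if PySem.Set.contains seen x then pvDedupFrom seen xs
               else x :: pvDedupFrom (PySem.Set.add seen x) xs

theorem pv_contains_false_iff (s : PySem.Set Int) (x : Int) :
    PySem.Set.contains s x = false ↔ x ∉ s := by
  simp [PySem.Set.contains]

theorem pv_contains_true_iff (s : PySem.Set Int) (x : Int) :
    PySem.Set.contains s x = true ↔ x ∈ s := by
  simp [PySem.Set.contains]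

theorem pv_foldl_add_eq_append_dedupFrom (l : List Int) (seen : PySem.Set Int) :
    l.foldl PySem.Set.add seen = seen ++ pvDedupFrom seen l := by
  induction l generalizing seen with
  | nil => simp [pvDedupFrom]
  | cons x xs ih =>
    simp only [List.foldl_cons, pvDedupFrom]
    by_cases hc : PySem.Set.contains seen x
    · have hx : x ∈ seen := (pv_contains_true_iff seen x).mp hc
      simp only [hc, if_true]
      have : PySem.Set.add seen x = seen := by simp [PySem.Set.add, hx]
      rw [this, ih]
    · have hx : x ∉ seen := (pv_contains_false_iff seen x).mp (Bool.eq_false_iff.mpr hc)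
      simp only [hc]
      have : PySem.Set.add seen x = seen ++ [x] := by simp [PySem.Set.add, hx]
      rw [this, ih, List.append_assoc]
      rfl

-- A's inner dedup loop, characterised
theorem pv_inner_loop (kg1 : Int) (l : List Int) (acc : List (Int × Int)) (seen : PySem.Set Int) :
    (l.foldl (fun (q : List (Int × Int) × PySem.Set Int) kg2 =>
        if PySem.Set.contains q.2 kg2 then q
        else (q.1 ++ [(kg1, kg2)], PySem.Set.add q.2 kg2)) (acc, seen)).1
      = acc ++ (pvDedupFrom seen l).map (fun v => (kg1, v)) := by
  induction l generalizing acc seen with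
  | nil => simp [pvDedupFrom]
  | cons x xs ih =>
    simp only [List.foldl_cons, pvDedupFrom]
    by_cases hc : PySem.Set.contains seen x
    · simp only [hc, if_true]
      exact ih acc seen
    · simp only [hc, if_false, Bool.false_eq_true]
      rw [ih (acc ++ [(kg1, x)]) (PySem.Set.add seen x), List.append_assoc]
      rfl

-- the per-key block both programs emit, phrased on A's side
def pvBlock (ep : PySem.Dict Int Int) (k : Int) (vals : List Int) : List (Int × Int) :=
  match ep.get? k with
  | some e => (k, e) :: (pvDedupFrom (PySem.Set.ofList [e]) vals).map (fun v => (k, v))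
  | none => (pvDedupFrom PySem.Set.empty vals).map (fun v => (k, v))

def pvVals (pairs : List (Int × Int)) (k : Int) : List Int :=
  (pairs.filter (fun p => p.1 == k)).map (fun p => p.2)

-- A's outer loop over distinct keys is a flatMap of blocks
theorem pv_outer_loop (ep : PySem.Dict Int Int) (grouped : PySem.Dict Int (List Int))
    (keys : List Int) (acc : List (Int × Int)) (s : PySem.Set Int)
    (hnd : keys.Nodup) (hs : ∀ k ∈ keys, k ∉ s) :
    (keys.foldl (fun (st : List (Int × Int) × PySem.Set Int) kg1 =>
      if PySem.Set.contains st.2 kg1 then st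
      else
        let processed := PySem.Set.add st.2 kg1
        let kg2_list := grouped.getD kg1 []
        match ep.get? kg1 with
        | some exec_kg2 =>
          let inner := kg2_list.foldl (fun (q : List (Int × Int) × PySem.Set Int) kg2 =>
              if PySem.Set.contains q.2 kg2 then q
              else (q.1 ++ [(kg1, kg2)], PySem.Set.add q.2 kg2))
            (st.1 ++ [(kg1, exec_kg2)], PySem.Set.ofList [exec_kg2])
          (inner.1, processed)
        | none =>
          let inner := kg2_list.foldl (fun (q : List (Int × Int) × PySem.Set Int) kg2 =>
              if PySem.Set.contains q.2 kg2 then q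
              else (q.1 ++ [(kg1, kg2)], PySem.Set.add q.2 kg2))
            (st.1, PySem.Set.empty)
          (inner.1, processed)) (acc, s)).1
      = acc ++ keys.flatMap (fun k => pvBlock ep k (grouped.getD k [])) := by
  induction keys generalizing acc s with
  | nil => simp
  | cons k ks ih =>
    have hck : PySem.Set.contains s k = false :=
      (pv_contains_false_iff s k).mpr (hs k (List.mem_cons_self))
    have hsk : ∀ k' ∈ ks, k' ∉ PySem.Set.add s k := by
      intro k' hk' hmem
      rcases (PySem.Set.mem_add s k k').mp hmem with h | h
      · exact hs k' (List.mem_cons_of_mem _ hk') h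
      · exact (List.nodup_cons.mp hnd).1 (h ▸ hk')
    simp only [List.foldl_cons, hck, if_false, Bool.false_eq_true]
    cases hep : ep.get? k with
    | some e =>
      show (List.foldl _ (((grouped.getD k []).foldl (fun (q : List (Int × Int) × PySem.Set Int) kg2 =>
          if PySem.Set.contains q.2 kg2 then q
          else (q.1 ++ [(k, kg2)], PySem.Set.add q.2 kg2))
          (acc ++ [(k, e)], PySem.Set.ofList [e])).1, PySem.Set.add s k) ks).1 = _
      rw [ih _ _ (List.nodup_cons.mp hnd).2 hsk, pv_inner_loop, List.flatMap_cons]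
      simp [pvBlock, hep, List.append_assoc]
    | none =>
      show (List.foldl _ (((grouped.getD k []).foldl (fun (q : List (Int × Int) × PySem.Set Int) kg2 =>
          if PySem.Set.contains q.2 kg2 then q
          else (q.1 ++ [(k, kg2)], PySem.Set.add q.2 kg2))
          (acc, PySem.Set.empty)).1, PySem.Set.add s k) ks).1 = _
      rw [ih _ _ (List.nodup_cons.mp hnd).2 hsk, pv_inner_loop, List.flatMap_cons]
      simp [pvBlock, hep, List.append_assoc]

-- A as a flatMap over its sorted distinct keys
theorem pv_A_eq_flatMap (ps ep : List (Int × Int)) :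
    update_modality_pairs_py ps ep
      = (PySem.List.sorted (PySem.Set.ofList (ps.map (fun p => p.1))) (fun x => x)).flatMap
          (fun k => pvBlock (PySem.Dict.mk ep) k (pvVals ps k)) := by
  unfold update_modality_pairs_py
  have hnd : (PySem.List.sorted (PySem.Set.ofList (ps.map (fun p => p.1))) (fun x => x)).Nodup :=
    (PySem.List.sorted_perm _ _ _).nodup_iff.mpr (PySem.Set.nodup_ofList _)
  rw [pv_outer_loop _ _ _ _ _ hnd (by intro k _ h; simp [PySem.Set.empty] at h)]
  rw [List.nil_append]
  congr 1
  funext k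
  rw [PySem.Dict.getD_foldl_modify_append, PySem.Dict.getD_empty, List.nil_append]
  rfl

-- the sorted distinct keys of ps decompose as min :: keys of the filtered rest
theorem pv_keys_cons (ps : List (Int × Int)) (k : Int)
    (hmin : PySem.List.min? (ps.map (fun p => p.1)) (fun x => x) = some k) :
    PySem.List.sorted (PySem.Set.ofList (ps.map (fun p => p.1))) (fun x => x)
      = k :: PySem.List.sorted (PySem.Set.ofList ((ps.filter (fun p => !(p.1 == k))).map (fun p => p.1))) (fun x => x) := by
  have hmemR : ∀ x ∈ PySem.List.sorted (PySem.Set.ofList ((ps.filter (fun p => !(p.1 == k))).map (fun p => p.1))) (fun x => x),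
      x ∈ ps.map (fun p => p.1) ∧ x ≠ k := by
    intro x hx
    have hx' : x ∈ (ps.filter (fun p => !(p.1 == k))).map (fun p => p.1) := by
      have := (PySem.List.mem_sorted _ _ _ _).mp hx
      exact (PySem.Set.mem_ofList _ _).mp this
    rcases List.mem_map.mp hx' with ⟨p, hpf, rfl⟩
    have hf := List.mem_filter.mp hpf
    refine ⟨List.mem_map_of_mem hf.1, ?_⟩
    simpa using hf.2
  have hklt : ∀ x ∈ PySem.List.sorted (PySem.Set.ofList ((ps.filter (fun p => !(p.1 == k))).map (fun p => p.1))) (fun x => x), k < x := by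
    intro x hx
    exact lt_of_le_of_ne (PySem.List.min?_isMin hmin x (hmemR x hx).1) (Ne.symm (hmemR x hx).2)
  have hpair : (k :: PySem.List.sorted (PySem.Set.ofList ((ps.filter (fun p => !(p.1 == k))).map (fun p => p.1))) (fun x => x)).Pairwise
      (fun a b => (fun x => x) a < (fun x => x) b) :=
    List.pairwise_cons.mpr ⟨hklt, PySem.List.sorted_ofList_pairwise_lt _⟩
  have hnd : (k :: PySem.List.sorted (PySem.Set.ofList ((ps.filter (fun p => !(p.1 == k))).map (fun p => p.1))) (fun x => x)).Nodup :=
    hpair.imp (fun h => ne_of_lt h)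
  have hperm : (k :: PySem.List.sorted (PySem.Set.ofList ((ps.filter (fun p => !(p.1 == k))).map (fun p => p.1))) (fun x => x)).Perm
      (PySem.Set.ofList (ps.map (fun p => p.1))) := by
    rw [List.perm_ext_iff_of_nodup hnd (PySem.Set.nodup_ofList _)]
    intro a
    rw [PySem.Set.mem_ofList, List.mem_cons]
    constructor
    · rintro (rfl | ha)
      · exact PySem.List.min?_mem hmin
      · exact (hmemR a ha).1
    · intro ha
      by_cases hak : a = k
      · exact Or.inl hak
      · refine Or.inr ?_
        rw [PySem.List.mem_sorted, PySem.Set.mem_ofList]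
        rcases List.mem_map.mp ha with ⟨p, hp, rfl⟩
        exact List.mem_map_of_mem (List.mem_filter.mpr ⟨hp, by simpa using hak⟩)
  exact PySem.List.sorted_eq_of_perm_of_pairwise_lt _ _ _ hperm hpair

theorem pv_vals_filter (ps : List (Int × Int)) (k k' : Int) (h : k' ≠ k) :
    pvVals (ps.filter (fun p => !(p.1 == k))) k' = pvVals ps k' := by
  unfold pvVals
  rw [List.filter_filter]
  congr 1
  apply List.filter_congr
  intro a _
  by_cases h1 : a.1 = k'
  · simp [h1, h]
  · simp [h1]

theorem pv_block_eq_alt_block (ep : PySem.Dict Int Int) (k : Int) (vals : List Int) :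
    pvBlock ep k vals
      = (PySem.List.dedup (match ep.get? k with | some e => e :: vals | none => vals)).map (fun v => (k, v)) := by
  cases hep : ep.get? k with
  | none =>
    simp only [pvBlock, hep]
    rw [PySem.List.dedup_eq_ofList, PySem.Set.ofList_eq_foldl, pv_foldl_add_eq_append_dedupFrom]
    rfl
  | some e =>
    simp only [pvBlock, hep]
    have hadd : PySem.Set.add ([] : PySem.Set Int) e = [e] := by simp [PySem.Set.add]
    have hof : PySem.Set.ofList [e] = [e] := by
      rw [PySem.Set.ofList_eq_foldl, List.foldl_cons, hadd, List.foldl_nil]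
    have h1 : PySem.List.dedup (e :: vals) = e :: pvDedupFrom [e] vals := by
      rw [PySem.List.dedup_eq_ofList, PySem.Set.ofList_eq_foldl, List.foldl_cons, hadd,
        pv_foldl_add_eq_append_dedupFrom]
      rfl
    rw [h1, hof]
    simp

-- flatMap respects pointwise equality on members
theorem pv_flatMap_congr {α β : Type} (l : List α) (f g : α → List β)
    (h : ∀ x ∈ l, f x = g x) : l.flatMap f = l.flatMap g := by
  induction l with
  | nil => rfl
  | cons x xs ih =>
    rw [List.flatMap_cons, List.flatMap_cons, h x List.mem_cons_self,
      ih (fun y hy => h y (List.mem_cons_of_mem _ hy))]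

-- B's one-step unfoldings
theorem pv_altGo_none (ep : PySem.Dict Int Int) (pairs : List (Int × Int))
    (h : PySem.List.min? (pairs.map (fun p => p.1)) (fun x => x) = none) :
    updateModalityAltGo ep pairs = [] := by
  rw [updateModalityAltGo.eq_def]
  split
  · rfl
  · rename_i k heq; rw [h] at heq; cases heq

theorem pv_altGo_some (ep : PySem.Dict Int Int) (pairs : List (Int × Int)) (k : Int)
    (h : PySem.List.min? (pairs.map (fun p => p.1)) (fun x => x) = some k) :
    updateModalityAltGo ep pairs
      = (PySem.List.dedup (match ep.get? k with
          | some e => e :: (pairs.filter (fun p => p.1 == k)).map (fun p => p.2)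
          | none => (pairs.filter (fun p => p.1 == k)).map (fun p => p.2))).map (fun v => (k, v)) ++
        updateModalityAltGo ep (pairs.filter (fun p => !(p.1 == k))) := by
  rw [updateModalityAltGo.eq_def]
  split
  · rename_i heq; rw [h] at heq; cases heq
  · rename_i k' heq
    rw [h] at heq
    cases heq
    rfl

theorem pv_main (ps : List (Int × Int)) (ep : List (Int × Int)) :
    update_modality_pairs_py ps ep = updateModalityAltGo (PySem.Dict.mk ep) ps := by
  generalize hn : ps.length = n
  induction n using Nat.strong_induction_on generalizing ps with
  | _ n ih =>
  rw [pv_A_eq_flatMap]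
  cases hmin : PySem.List.min? (ps.map (fun p => p.1)) (fun x => x) with
  | none =>
    have hnil : ps = [] := by
      have := (PySem.List.min?_eq_none_iff _ _).mp hmin
      exact List.map_eq_nil_iff.mp this
    subst hnil
    rw [pv_altGo_none _ _ hmin]
    rfl
  | some k =>
    rw [pv_altGo_some _ _ _ hmin, pv_keys_cons ps k hmin, List.flatMap_cons]
    congr 1
    · exact pv_block_eq_alt_block (PySem.Dict.mk ep) k (pvVals ps k)
    · have hlt : (ps.filter (fun p => !(p.1 == k))).length < n := by
        rcases List.mem_map.mp (PySem.List.min?_mem hmin) with ⟨p, hp, hpk⟩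
        subst hn
        refine Nat.lt_of_le_of_ne (List.length_filter_le _ _) (fun he => ?_)
        have heq := (List.filter_sublist).eq_of_length he
        have hm : p ∈ ps.filter (fun p => !(p.1 == k)) := by rw [heq]; exact hp
        have := (List.mem_filter.mp hm).2
        simp [hpk] at this
      have hcongr : ∀ k' ∈ PySem.List.sorted (PySem.Set.ofList ((ps.filter (fun p => !(p.1 == k))).map (fun p => p.1))) (fun x => x),
          pvBlock (PySem.Dict.mk ep) k' (pvVals ps k') = pvBlock (PySem.Dict.mk ep) k' (pvVals (ps.filter (fun p => !(p.1 == k))) k') := by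
        intro k' hk'
        have hne : k' ≠ k := by
          have hmem := (PySem.Set.mem_ofList _ _).mp ((PySem.List.mem_sorted _ _ _ _).mp hk')
          rcases List.mem_map.mp hmem with ⟨p, hpf, rfl⟩
          have := (List.mem_filter.mp hpf).2
          simpa using this
        rw [pv_vals_filter ps k k' hne]
      rw [pv_flatMap_congr _ _ _ hcongr, ← pv_A_eq_flatMap (ps.filter (fun p => !(p.1 == k))) ep]
      exact ih _ hlt _ rfl

-- ===== VERDICT (by name: the statement is the Claim_ definition above) =====
theorem update_modality_pairs_py_spec : Claim_equal_update_modality_pairs_py := by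
  intro ps ep _
  unfold Spec_update_modality_pairs_py update_modality_pairs_py_alt
  exact pv_main ps ep
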